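-- pv_equiv track=rewrite | github.com/lanzac/transfer_energies_adjustment | generate_aa_database.py | sort_lines_by_resname
-- ===== SOURCE A (Python) =====
-- residueName3To1 = {
--         "ALA" : "A",
--         "ARG" : "R",
--         "ASN" : "N",
--         "ASP" : "D",
--         "CYS" : "C",
--         "GLN" : "Q",
--         "GLU" : "E",
--         "GLY" : "G",
--         "HIS" : "H",
--         "ILE" : "I",
--         "LEU" : "L",
--         "LYS" : "K",
--         "MET" : "M",
--         "PHE" : "F",
--         "PRO" : "P",
--         "SER" : "S",
--         "THR" : "T",
--         "TRP" : "W",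
--         "TYR" : "Y",
--         "VAL" : "V"
--     }
--
-- def sort_lines_by_resname(res_lines):
--     residue_to_database = {res3 : [] for res3 in residueName3To1.keys()}
--     res_lines_number = len(res_lines)
--     for i, rl in enumerate(res_lines):
--         res_name = rl[17:20]
--         if (res_name in residue_to_database.keys()):
--             residue_to_database[res_name].append(rl)
--
--     return residue_to_database
-- ===== SOURCE B (Python) =====
-- residueName3To1 = {
--         "ALA" : "A", "ARG" : "R", "ASN" : "N", "ASP" : "D", "CYS" : "C",
--         "GLN" : "Q", "GLU" : "E", "GLY" : "G", "HIS" : "H", "ILE" : "I",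
--         "LEU" : "L", "LYS" : "K", "MET" : "M", "PHE" : "F", "PRO" : "P",
--         "SER" : "S", "THR" : "T", "TRP" : "W", "TYR" : "Y", "VAL" : "V"
--     }
--
-- def sort_lines_by_resname(res_lines):
--     return {res3: [rl for rl in res_lines if rl[17:20] == res3]
--             for res3 in residueName3To1}
-- ===== Notes on version B (the rewrite author's own statement) =====
-- stated objective: idiomatic
-- what changed: Replaces the single dispatch-append pass over the lines (mutating pre-built empty buckets with a membership check) by a dict comprehension keyed over the 20 canonical residue names, each bucket built by an independent in-order filter of res_lines.
import Mathlib
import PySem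

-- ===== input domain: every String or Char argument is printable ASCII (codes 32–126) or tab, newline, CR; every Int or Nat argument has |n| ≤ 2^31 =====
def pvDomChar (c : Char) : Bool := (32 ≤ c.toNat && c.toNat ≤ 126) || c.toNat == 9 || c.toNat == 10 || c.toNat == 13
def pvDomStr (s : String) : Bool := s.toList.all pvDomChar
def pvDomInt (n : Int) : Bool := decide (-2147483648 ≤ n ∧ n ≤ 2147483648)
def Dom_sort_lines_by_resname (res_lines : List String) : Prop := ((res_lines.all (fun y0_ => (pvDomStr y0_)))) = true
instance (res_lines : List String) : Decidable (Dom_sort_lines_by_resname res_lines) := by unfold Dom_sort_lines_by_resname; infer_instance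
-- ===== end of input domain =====

-- B replaces A's single dispatch-append pass with a per-residue-name filtering comprehension; objective: idiomatic.

-- keys of residueName3To1, in insertion order (shared module constant)
def residueNames3 : List String :=
  ["ALA", "ARG", "ASN", "ASP", "CYS", "GLN", "GLU", "GLY", "HIS", "ILE",
   "LEU", "LYS", "MET", "PHE", "PRO", "SER", "THR", "TRP", "TYR", "VAL"]

-- ===== PORT A =====
-- literal transliteration: build a dict of empty buckets, then one pass over
-- res_lines appending each line to its rl[17:20] bucket if that key exists.
def sort_lines_by_resname (res_lines : List String) : List (String × List String) :=
  let residue_to_database : PySem.Dict String (List String) :=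
    PySem.Dict.ofList (residueNames3.map (fun res3 => (res3, ([] : List String))))
  let residue_to_database :=
    res_lines.foldl (fun d rl =>
      let res_name := PySem.Str.slice rl (some 17) (some 20)
      if d.contains res_name then d.modify res_name [] (fun v => v ++ [rl]) else d)
      residue_to_database
  residue_to_database.items

-- ===== PORT B =====
-- literal transliteration of Source B's dict comprehension: one independent
-- in-order filter of res_lines per canonical residue name (keys distinct,
-- so the comprehension's dict is exactly this association list).
def sort_lines_by_resname_alt (res_lines : List String) : List (String × List String) :=
  residueNames3.map (fun res3 =>
    (res3, res_lines.filter (fun rl => PySem.Str.slice rl (some 17) (some 20) == res3)))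

-- ===== PRECONDITION & SPEC =====
def Spec_sort_lines_by_resname (res_lines : List String) (out : List (String × List String)) : Prop := out = sort_lines_by_resname_alt res_lines
instance (res_lines : List String) (out : List (String × List String)) : Decidable (Spec_sort_lines_by_resname res_lines out) := by unfold Spec_sort_lines_by_resname; infer_instance

-- ===== CLAIM (what is proved, stated in full; the proofs are below) =====
def Claim_equal_sort_lines_by_resname : Prop := ∀ (res_lines : List String), Dom_sort_lines_by_resname res_lines → Spec_sort_lines_by_resname res_lines (sort_lines_by_resname res_lines)

-- ===== LEMMAS AND PROOFS =====

-- the loop body of A's pass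
def pvStep (d : PySem.Dict String (List String)) (rl : String) : PySem.Dict String (List String) :=
  let res_name := PySem.Str.slice rl (some 17) (some 20)
  if d.contains res_name then d.modify res_name [] (fun v => v ++ [rl]) else d

theorem pvStep_keys (d : PySem.Dict String (List String)) (rl : String) :
    (pvStep d rl).keys = d.keys := by
  show (if d.contains (PySem.Str.slice rl (some 17) (some 20)) = true
      then d.modify (PySem.Str.slice rl (some 17) (some 20)) [] (fun v => v ++ [rl]) else d).keys = d.keys
  by_cases h : d.contains (PySem.Str.slice rl (some 17) (some 20)) = true
  · rw [if_pos h, PySem.Dict.keys_modify, PySem.Dict.keys_insert_of_contains _ _ h]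
  · rw [if_neg h]

theorem pvFoldl_keys (lines : List String) (d : PySem.Dict String (List String)) :
    (lines.foldl pvStep d).keys = d.keys := by
  induction lines generalizing d with
  | nil => rfl
  | cons rl rest ih => simp [List.foldl, ih, pvStep_keys]

theorem pvFoldl_getD (lines : List String) (d : PySem.Dict String (List String))
    (k : String) (hk : k ∈ d.keys) :
    (lines.foldl pvStep d).getD k [] =
      d.getD k [] ++ lines.filter (fun rl => PySem.Str.slice rl (some 17) (some 20) == k) := by
  induction lines generalizing d with
  | nil => simp
  | cons rl rest ih =>
    simp only [List.foldl, List.filter]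
    by_cases hc : (pvStep d rl) = d.modify (PySem.Str.slice rl (some 17) (some 20)) [] (fun v => v ++ [rl]) ∧
        d.contains (PySem.Str.slice rl (some 17) (some 20)) = true
    · obtain ⟨hstep, hcont⟩ := hc
      rw [hstep, ih _ (by rw [PySem.Dict.keys_modify, PySem.Dict.keys_insert_of_contains _ _ hcont]; exact hk)]
      rw [PySem.Dict.getD_modify]
      by_cases hkn : k = PySem.Str.slice rl (some 17) (some 20)
      · subst hkn
        simp [List.append_assoc]
      · have : (PySem.Str.slice rl (some 17) (some 20) == k) = false := by
          simp only [beq_eq_false_iff_ne, ne_eq]; exact fun h => hkn h.symm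
        simp [hkn, this]
    · have hcont : d.contains (PySem.Str.slice rl (some 17) (some 20)) = false := by
        by_contra hne
        exact hc ⟨by simp [pvStep, eq_true_of_ne_false hne], eq_true_of_ne_false hne⟩
      have hstep : pvStep d rl = d := by simp [pvStep, hcont]
      have hne : (PySem.Str.slice rl (some 17) (some 20) == k) = false := by
        rw [PySem.Dict.contains_eq_decide_mem_keys] at hcont
        simp only [decide_eq_false_iff_not] at hcont
        simp only [beq_eq_false_iff_ne, ne_eq]
        intro h; exact hcont (h ▸ hk)
      rw [hstep, hne]
      exact ih d hk

-- A's initial dict: keys are the 20 residue names, every bucket is empty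
def pvInit : PySem.Dict String (List String) :=
  PySem.Dict.ofList (residueNames3.map (fun res3 => (res3, ([] : List String))))

theorem pvInit_keys : pvInit.keys = residueNames3 := by decide
theorem pvInit_nodup : residueNames3.Nodup := by decide
theorem pvInit_getD (k : String) (hk : k ∈ residueNames3) : pvInit.getD k [] = [] := by
  fin_cases hk <;> rfl

theorem sort_lines_by_resname_spec : Claim_equal_sort_lines_by_resname := by
  intro res_lines _
  unfold Spec_sort_lines_by_resname sort_lines_by_resname sort_lines_by_resname_alt
  show (res_lines.foldl pvStep pvInit).items = _
  have hkeys : (res_lines.foldl pvStep pvInit).keys = residueNames3 := by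
    rw [pvFoldl_keys, pvInit_keys]
  rw [PySem.Dict.items_eq_map_keys _ (hkeys ▸ pvInit_nodup) [], hkeys]
  refine List.map_congr_left (fun k hk => ?_)
  rw [pvFoldl_getD res_lines pvInit k (by rw [pvInit_keys]; exact hk),
      pvInit_getD k hk]
  rfl
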